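-- pv_equiv track=rewrite | github.com/zorell11/python-academy | 9. Errors & Debugging/Exercises/vertikilni_histogram_engeto.py | vert_histogram
-- ===== SOURCE A (Python) =====
-- def vert_histogram(data, col_width=2):
--     LABEL_WIDTH = len(str(max(data))) + 1
--     DATASET_SIZE = len(data)
--     hist = []
--     current_row_num = max(data)
--     while current_row_num > 0:
--         row = generate_row(current_row_num, col_width, data, LABEL_WIDTH, DATASET_SIZE)
--         hist.append(row)
--         current_row_num -= 1
--     hist.append(make_baseline(col_width, LABEL_WIDTH, DATASET_SIZE))
--     return hist
--
-- def generate_row(current_row_num, col_width, data, LABEL_WIDTH, DATASET_SIZE):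
--     label = '{: >{w}}|'.format(current_row_num, w=LABEL_WIDTH)
--     row = [label] + [' ' * col_width] * DATASET_SIZE
--     for i in range(DATASET_SIZE):
--         if data[i] >= current_row_num:
--             row[i + 1] = '*' * col_width
--     return row
--
-- def make_baseline(col_width, LABEL_WIDTH, DATASET_SIZE):
--     label_offset = [' '] * LABEL_WIDTH + [' ']
--     line = ['_' * (col_width + 2)] * DATASET_SIZE + ["_"] * 2
--     return [''.join(label_offset + line)]
-- ===== SOURCE B (Python) =====
-- def vert_histogram(data, col_width=2):
--     M = max(data)
--     label_w = len(str(M)) + 1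
--     n = len(data)
--     levels = list(range(M, 0, -1))
--     star = '*' * col_width
--     space = ' ' * col_width
--     # column-major grid: one vertical strip of cells per data point
--     cols = [[star if v >= lvl else space for lvl in levels] for v in data]
--     # transpose the grid into rows, prepending each row's level label
--     rows = [['{: >{w}}'.format(lvl, w=label_w) + '|'] + [c[r] for c in cols]
--             for r, lvl in enumerate(levels)]
--     baseline = ' ' * (label_w + 1) + ('_' * (col_width + 2)) * n + '__'
--     return rows + [[baseline]]
-- ===== Notes on version B (the rewrite author's own statement) =====
-- stated objective: alternative
-- what changed: B builds a column-major grid (one vertical strip of cells per data point) and transposes it into labelled rows with enumerate, instead of A's top-down while-loop that preallocates each row and mutates its cells in place; the baseline is one string concatenation instead of a join over a list of pieces.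
import Mathlib
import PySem

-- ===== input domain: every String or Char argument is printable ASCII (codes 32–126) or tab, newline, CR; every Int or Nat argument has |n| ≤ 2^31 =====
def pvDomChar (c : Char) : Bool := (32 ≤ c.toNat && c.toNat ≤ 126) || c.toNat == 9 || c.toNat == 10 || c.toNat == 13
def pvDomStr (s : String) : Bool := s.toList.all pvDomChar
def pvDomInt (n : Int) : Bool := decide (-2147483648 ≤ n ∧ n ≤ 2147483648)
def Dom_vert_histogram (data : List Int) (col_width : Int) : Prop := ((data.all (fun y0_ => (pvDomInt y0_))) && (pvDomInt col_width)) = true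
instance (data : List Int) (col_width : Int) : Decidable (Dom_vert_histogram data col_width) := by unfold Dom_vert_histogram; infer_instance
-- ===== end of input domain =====

-- B re-decomposes A: a column-major grid of cell strips transposed into labelled rows, vs A's
-- row-by-row while-loop with in-place cell mutation; same output, similar cost (objective: alternative).

-- shared library-level helpers (ports of Python primitives both sources call):
-- 'c' * k  (negative k gives '', like Python)
def repChars (c : Char) (k : Int) : List Char := List.replicate k.toNat c
-- '{: >{w}}'.format(n): str(n) right-justified with spaces to width w (exact for w ≥ 0, the only widths used)
def pyFormatRight (n w : Int) : List Char :=
  List.replicate (w.toNat - (PySem.Int.toChars n).length) ' ' ++ PySem.Int.toChars n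

-- ===== PORT A =====
def generate_row (current_row_num col_width : Int) (data : List Int) (LABEL_WIDTH : Int)
    (DATASET_SIZE : Nat) : List String :=
  let label := String.ofList (pyFormatRight current_row_num LABEL_WIDTH ++ ['|'])
  let row := label :: List.replicate DATASET_SIZE (String.ofList (repChars ' ' col_width))
  (List.range DATASET_SIZE).foldl
    (fun r (i : Nat) =>
      if PySem.List.pyGetD data (i : Int) 0 ≥ current_row_num then
        r.set (i + 1) (String.ofList (repChars '*' col_width))
      else r)
    row

def make_baseline (col_width LABEL_WIDTH : Int) (DATASET_SIZE : Nat) : List String :=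
  let label_offset := List.replicate LABEL_WIDTH.toNat " " ++ [" "]
  let line := List.replicate DATASET_SIZE (String.ofList (repChars '_' (col_width + 2)))
                ++ List.replicate 2 "_"
  [PySem.Str.join "" (label_offset ++ line)]

-- the while-loop of A, counting current_row_num down to 0
def vh_loop (data : List Int) (col_width LABEL_WIDTH : Int) (DATASET_SIZE : Nat)
    (current : Int) : List (List String) :=
  if h : 0 < current then
    generate_row current col_width data LABEL_WIDTH DATASET_SIZE
      :: vh_loop data col_width LABEL_WIDTH DATASET_SIZE (current - 1)
  else []
termination_by current.toNat
decreasing_by omega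

def vert_histogram (data : List Int) (col_width : Int) : List (List String) :=
  let M := (PySem.List.max? data (fun x => x)).getD 0   -- max(data); Pre_ excludes [] where Python raises
  let LABEL_WIDTH := PySem.Str.len (PySem.Int.toStr M) + 1
  let DATASET_SIZE := data.length
  vh_loop data col_width LABEL_WIDTH DATASET_SIZE M
    ++ [make_baseline col_width LABEL_WIDTH DATASET_SIZE]

-- ===== PORT B =====
def vert_histogram_alt (data : List Int) (col_width : Int) : List (List String) :=
  let M := (PySem.List.max? data (fun x => x)).getD 0   -- max(data); Pre_ excludes [] where Python raises
  let label_w := PySem.Str.len (PySem.Int.toStr M) + 1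
  let n := data.length
  let levels := PySem.List.pyRange M 0 (-1)
  let star := String.ofList (repChars '*' col_width)
  let space := String.ofList (repChars ' ' col_width)
  -- column-major grid: one vertical strip of cells per data point
  let cols := data.map (fun v =>
    levels.map (fun lvl => if v ≥ lvl then star else space))
  -- transpose the grid into rows, prepending each row's level label
  let rows := (PySem.List.enumerate levels).map (fun p =>
    String.ofList (pyFormatRight p.2 label_w ++ ['|'])
      :: cols.map (fun c => PySem.List.pyGetD c p.1 ""))
  let baseline := String.ofList (List.replicate (label_w + 1).toNat ' '
      ++ (List.replicate n (repChars '_' (col_width + 2))).flatten ++ ['_', '_'])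
  rows ++ [[baseline]]

-- ===== PRECONDITION & SPEC =====
-- Pre_ excludes only the empty list, on which Python's max(data) raises ValueError in both A and B.
def Pre_vert_histogram (data : List Int) (col_width : Int) : Prop := data ≠ []
instance (data : List Int) (col_width : Int) : Decidable (Pre_vert_histogram data col_width) := by
  unfold Pre_vert_histogram; infer_instance

def pvWitness_vert_histogram : List Int × Int := ([2, 0, 3], 2)

def Spec_vert_histogram (data : List Int) (col_width : Int) (out : List (List String)) : Prop := out = vert_histogram_alt data col_width
instance (data : List Int) (col_width : Int) (out : List (List String)) : Decidable (Spec_vert_histogram data col_width out) := by unfold Spec_vert_histogram; infer_instance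

-- ===== CLAIM (what is proved, stated in full; the proofs are below) =====
def Claim_equal_vert_histogram : Prop := ∀ (data : List Int) (col_width : Int), Dom_vert_histogram data col_width → Pre_vert_histogram data col_width → Spec_vert_histogram data col_width (vert_histogram data col_width)

-- ===== LEMMAS AND PROOFS =====

-- the canonical row for level c
def rowOf (data : List Int) (col_width lw c : Int) : List String :=
  String.ofList (pyFormatRight c lw ++ ['|'])
    :: data.map (fun v =>
        if v ≥ c then String.ofList (repChars '*' col_width)
        else String.ofList (repChars ' ' col_width))

-- A's in-place fold of sets over a freshly replicated row, in closed form
theorem foldl_set_range {α : Type} (n : Nat) (P : Nat → Bool) (s t : α) :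
    ∀ (pre : List α),
      (List.range n).foldl
        (fun r i => if P i then r.set (i + pre.length) s else r)
        (pre ++ List.replicate n t)
      = pre ++ (List.range n).map (fun i => if P i then s else t) := by
  induction n generalizing P with
  | zero => simp
  | succ n ih =>
      intro pre
      rw [List.range_succ_eq_map]
      simp only [List.foldl_cons, List.foldl_map, List.replicate_succ]
      have h0 : (if P 0 then (pre ++ t :: List.replicate n t).set (0 + pre.length) s
                 else pre ++ t :: List.replicate n t)
          = (pre ++ [if P 0 then s else t]) ++ List.replicate n t := by
        split_ifs with hp
        · rw [Nat.zero_add, List.set_append, if_neg (by omega)]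
          simp
        · simp
      rw [h0]
      have hf : (fun (r : List α) (i : Nat) =>
            if P i.succ then r.set (i.succ + pre.length) s else r)
          = (fun (r : List α) (i : Nat) =>
            if (fun j => P (j + 1)) i then r.set (i + (pre ++ [if P 0 then s else t]).length) s else r) := by
        funext r i
        simp only [Nat.succ_eq_add_one, List.length_append, List.length_singleton]
        congr 2
        omega
      rw [hf, ih (fun j => P (j + 1)) (pre ++ [if P 0 then s else t])]
      simp [List.map_map, Function.comp_def, Nat.succ_eq_add_one, List.append_assoc]

-- indexing over range(len(data)) is a plain map over data
theorem map_range_getD {α β : Type} (g : α → β) (d : α) :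
    ∀ (data : List α),
      (List.range data.length).map (fun i => g (data.getD i d)) = data.map g := by
  intro data
  induction data with
  | nil => simp
  | cons x xs ih =>
      rw [List.length_cons, List.range_succ_eq_map]
      simp only [List.map_cons, List.map_map, Function.comp_def, List.getD_cons_zero,
        Nat.succ_eq_add_one, List.getD_cons_succ]
      rw [ih]

theorem generate_row_eq (current col_width : Int) (data : List Int) (lw : Int) :
    generate_row current col_width data lw data.length = rowOf data col_width lw current := by
  unfold generate_row rowOf
  simp only [PySem.List.pyGetD_natCast]
  have h := foldl_set_range (α := String) data.length
      (fun i => decide (data.getD i 0 ≥ current))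
      (String.ofList (repChars '*' col_width)) (String.ofList (repChars ' ' col_width))
      [String.ofList (pyFormatRight current lw ++ ['|'])]
  simp only [List.length_singleton, List.singleton_append, decide_eq_true_eq] at h
  rw [h]
  rw [map_range_getD (fun v => if v ≥ current
        then String.ofList (repChars '*' col_width)
        else String.ofList (repChars ' ' col_width)) 0 data]

theorem vh_loop_eq (data : List Int) (col_width lw : Int) :
    ∀ (k : Nat) (m : Int), m.toNat = k →
      vh_loop data col_width lw data.length m
        = (List.range k).map (fun r : Nat => rowOf data col_width lw (m - (r : Int))) := by
  intro k
  induction k with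
  | zero =>
      intro m hm
      rw [vh_loop, dif_neg (by omega)]
      simp
  | succ k ih =>
      intro m hm
      rw [vh_loop, dif_pos (by omega)]
      rw [ih (m - 1) (by omega)]
      rw [List.range_succ_eq_map]
      simp only [List.map_cons, List.map_map, Function.comp_def, Nat.cast_zero, sub_zero,
        Nat.succ_eq_add_one]
      rw [generate_row_eq]
      congr 1
      apply List.map_congr_left
      intro r _
      congr 1
      push_cast
      ring

theorem alt_rows_eq (data : List Int) (col_width lw M : Int) :
    (PySem.List.enumerate (PySem.List.pyRange M 0 (-1))).map (fun p =>
        String.ofList (pyFormatRight p.2 lw ++ ['|'])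
          :: (data.map (fun v =>
                (PySem.List.pyRange M 0 (-1)).map (fun lvl =>
                  if v ≥ lvl then String.ofList (repChars '*' col_width)
                  else String.ofList (repChars ' ' col_width)))).map
              (fun c => PySem.List.pyGetD c p.1 ""))
      = (List.range M.toNat).map (fun r : Nat => rowOf data col_width lw (M - (r : Int))) := by
  have hlen : (PySem.List.pyRange M 0 (-1)).length = M.toNat := by
    simp [PySem.List.pyRange_neg_one]
  apply List.ext_getElem
  · simp [PySem.List.length_enumerate, hlen]
  · intro r h1 h2
    have hr : r < M.toNat := by
      simpa [PySem.List.length_enumerate, hlen] using h1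
    have hlev : (PySem.List.pyRange M 0 (-1))[r]'(by omega) = M - (r : Int) := by
      simp [PySem.List.pyRange_neg_one]
    simp only [List.getElem_map, PySem.List.getElem_enumerate, List.getElem_range]
    rw [hlev]
    unfold rowOf
    congr 1
    rw [List.map_map]
    apply List.map_congr_left
    intro v _
    simp only [Function.comp_def, zero_add, PySem.List.pyGetD_natCast]
    rw [List.getD_eq_getElem _ _ (by simpa [hlen] using hr)]
    simp [hlev]

theorem flatten_intersperse_nil {α : Type} : ∀ (ls : List (List α)),
    (List.intersperse [] ls).flatten = ls.flatten
  | [] => rfl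
  | [x] => rfl
  | x :: y :: t => by
      rw [List.intersperse_cons₂]
      simp only [List.flatten_cons, List.nil_append]
      rw [flatten_intersperse_nil (y :: t)]
      simp

theorem baseline_eq (col_width lw : Int) (n : Nat) (hlw : 0 ≤ lw) :
    make_baseline col_width lw n
      = [String.ofList (List.replicate (lw + 1).toNat ' '
          ++ (List.replicate n (repChars '_' (col_width + 2))).flatten ++ ['_', '_'])] := by
  simp only [make_baseline]
  congr 1
  conv_lhs => rw [← String.ofList_toList (s := PySem.Str.join "" _)]
  rw [PySem.Str.toList_join]
  congr 1
  simp only [PySem.Chars.join, List.intercalate]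
  simp only [List.map_append, List.map_replicate, String.toList_ofList]
  have hsp : (" " : String).toList = [' '] := rfl
  have hus : ("_" : String).toList = ['_'] := rfl
  have htn : (lw + 1).toNat = lw.toNat + 1 := by omega
  simp [hsp, hus, htn, flatten_intersperse_nil,
    List.replicate_succ' (n := lw.toNat), List.append_assoc]

-- ===== VERDICT (by name: the statement is the Claim_ definition above) =====
theorem vert_histogram_spec : Claim_equal_vert_histogram := by
  intro data col_width _hdom _hpre
  unfold Spec_vert_histogram
  simp only [vert_histogram, vert_histogram_alt]
  have hlw : 0 ≤ PySem.Str.len (PySem.Int.toStr ((PySem.List.max? data (fun x => x)).getD 0)) + 1 := by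
    rw [PySem.Str.len_eq]; positivity
  rw [vh_loop_eq data col_width _ _ _ rfl]
  rw [alt_rows_eq]
  rw [baseline_eq _ _ _ hlw]
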